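-- pv_equiv track=rewrite | github.com/FZ1977/Python | sort_by_vocals.py | Speciali
-- ===== SOURCE A (Python) =====
-- def Speciali(a):
--     s = ('*','+','-','/',':','.',',',';','_','=','!','?')
--     speciali = []
--
--     for i in a:
--         if(i in s):
--             speciali.append(i)
--
--     for j in range(len(speciali)-1):
--         for z in range(j+1,len(speciali)):
--             if(speciali[j] > speciali[z]):
--                 temp = speciali[j]
--                 speciali[j] = speciali[z]
--                 speciali[z] = temp
--
--     return speciali
-- ===== SOURCE B (Python) =====
-- def Speciali(a):
--     # Counting/bucket sort over the fixed special alphabet in ascending codepoint order.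
--     order = "!*+,-./:;=?_"
--     out = []
--     for c in order:
--         n = 0
--         for ch in a:
--             if ch == c:
--                 n += 1
--         out.extend([c] * n)
--     return out
-- ===== Notes on version B (the rewrite author's own statement) =====
-- stated objective: alternative
-- what changed: Replaces filter-then-quadratic-exchange-sort with a counting/bucket pass: iterate the 12 allowed special characters in ascending codepoint order and emit each one as many times as it occurs in the input, so no comparison sort happens at all.
import Mathlib
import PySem

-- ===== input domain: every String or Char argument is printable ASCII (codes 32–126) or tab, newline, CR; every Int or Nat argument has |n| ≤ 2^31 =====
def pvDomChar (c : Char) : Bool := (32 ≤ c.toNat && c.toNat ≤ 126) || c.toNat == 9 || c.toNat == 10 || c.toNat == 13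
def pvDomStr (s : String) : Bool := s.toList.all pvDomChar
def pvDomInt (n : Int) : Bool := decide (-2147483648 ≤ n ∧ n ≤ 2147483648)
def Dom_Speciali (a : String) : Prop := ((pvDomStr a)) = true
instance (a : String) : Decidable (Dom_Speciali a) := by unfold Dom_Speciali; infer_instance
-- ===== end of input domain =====

-- B replaces A's filter + quadratic exchange sort by a counting/bucket pass over the
-- 12 allowed special characters in ascending codepoint order (objective: alternative).

-- ===== PORT A =====
-- the tuple s of A, in A's order
def pvS : List Char := ['*','+','-','/',':','.',',',';','_','=','!','?']

-- one comparison/swap step of the inner loop: speciali[j] > speciali[z] → swap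
-- (indices produced by the ranges are always in bounds, so getD's default is never used)
def pvInnerStep (ys : List Char) (j z : Nat) : List Char :=
  if ys.getD z ' ' < ys.getD j ' ' then
    (ys.set j (ys.getD z ' ')).set z (ys.getD j ' ')
  else ys

-- the inner loop: for z in range(j+1, len(speciali))
def pvInner (ys : List Char) (j : Nat) : List Char :=
  (List.range' (j+1) (ys.length - (j+1))).foldl (fun acc z => pvInnerStep acc j z) ys

def Speciali (a : String) : List String :=
  let speciali := a.toList.filter (fun i => i ∈ pvS)
  -- for j in range(len(speciali)-1): inner loop
  let sorted := (List.range (speciali.length - 1)).foldl pvInner speciali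
  sorted.map (fun c => String.ofList [c])

-- ===== PORT B =====
-- the string `order` of Source B, ascending codepoints
def pvOrder : List Char := ['!','*','+',',','-','.','/',':',';','=','?','_']

-- inner counting loop of Source B: n = 0; for ch in a: if ch == c: n += 1
def pvCount (a : List Char) (c : Char) : Nat :=
  a.foldl (fun n ch => if ch = c then n + 1 else n) 0

def Speciali_alt (a : String) : List String :=
  -- out = []; for c in order: out.extend([c] * n)
  (pvOrder.foldl (fun out c => out ++ List.replicate (pvCount a.toList c) c) []).map
    (fun c => String.ofList [c])

-- ===== PRECONDITION & SPEC =====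
def Spec_Speciali (a : String) (out : List String) : Prop := out = Speciali_alt a
instance (a : String) (out : List String) : Decidable (Spec_Speciali a out) := by unfold Spec_Speciali; infer_instance

-- ===== CLAIM (what is proved, stated in full; the proofs are below) =====
def Claim_equal_Speciali : Prop := ∀ (a : String), Dom_Speciali a → Spec_Speciali a (Speciali a)

-- ===== LEMMAS AND PROOFS =====

-- the inner loop, restructured: carry the current head (speciali[j]) and the already-scanned tail
def pvBub : Char × List Char → List Char → Char × List Char
  | p, [] => p
  | (h, acc), x :: t => if x < h then pvBub (x, acc ++ [h]) t else pvBub (h, acc ++ [x]) t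

theorem pvBub_len : ∀ (t : List Char) (h : Char) (acc : List Char),
    ((pvBub (h, acc) t).2).length = acc.length + t.length := by
  intro t
  induction t with
  | nil => intro h acc; simp [pvBub]
  | cons x t ih =>
    intro h acc
    simp only [pvBub]
    split <;> simp [ih] <;> omega

-- functional form of A's sort: repeatedly select into the head
def pvSelSort : List Char → List Char
  | [] => []
  | h :: t =>
    let p := pvBub (h, []) t
    p.1 :: pvSelSort p.2
termination_by l => l.length
decreasing_by simp [pvBub_len]

theorem pvBub_perm : ∀ (t : List Char) (h : Char) (acc : List Char),
    List.Perm ((pvBub (h, acc) t).1 :: (pvBub (h, acc) t).2) (h :: (acc ++ t)) := by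
  intro t
  induction t with
  | nil => intro h acc; simp [pvBub]
  | cons x t ih =>
    intro h acc
    simp only [pvBub]
    split
    · refine ((ih x (acc ++ [h])).trans ?_)
      simp only [List.append_assoc, List.singleton_append]
      exact (List.perm_middle.cons x).trans
        ((List.Perm.swap h x (acc ++ t)).trans (List.perm_middle.symm.cons h))
    · simpa using ih h (acc ++ [x])

theorem pvBub_min : ∀ (t : List Char) (h : Char) (acc : List Char),
    (∀ y ∈ acc, h ≤ y) →
    (pvBub (h, acc) t).1 ≤ h ∧ ∀ y ∈ (pvBub (h, acc) t).2, (pvBub (h, acc) t).1 ≤ y := by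
  intro t
  induction t with
  | nil => intro h acc hacc; exact ⟨le_refl h, hacc⟩
  | cons x t ih =>
    intro h acc hacc
    simp only [pvBub]
    split
    · rename_i hlt
      have hx : ∀ y ∈ acc ++ [h], x ≤ y := by
        intro y hy
        rcases List.mem_append.mp hy with hy | hy
        · exact le_of_lt (lt_of_lt_of_le hlt (hacc y hy))
        · simp at hy; subst hy; exact le_of_lt hlt
      obtain ⟨h1, h2⟩ := ih x (acc ++ [h]) hx
      exact ⟨le_trans h1 (le_of_lt hlt), h2⟩
    · rename_i hge
      have hx : ∀ y ∈ acc ++ [x], h ≤ y := by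
        intro y hy
        rcases List.mem_append.mp hy with hy | hy
        · exact hacc y hy
        · simp at hy; subst hy; exact not_lt.mp hge
      exact ih h (acc ++ [x]) hx

theorem pvSelSort_perm : ∀ (n : Nat) (l : List Char), l.length = n → List.Perm (pvSelSort l) l := by
  intro n
  induction n using Nat.strong_induction_on with
  | _ n ih =>
    intro l hl
    match l with
    | [] => simp [pvSelSort]
    | h :: t =>
      simp only [pvSelSort]
      have hlen : ((pvBub (h, []) t).2).length = t.length := by simp [pvBub_len]
      have hn : t.length + 1 = n := by simpa using hl
      have hrec := ih ((pvBub (h, []) t).2).length (by omega) _ rfl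
      refine (hrec.cons _).trans ?_
      have := pvBub_perm t h []
      simpa using this

theorem pvSelSort_sorted : ∀ (n : Nat) (l : List Char), l.length = n →
    (pvSelSort l).Pairwise (· ≤ ·) := by
  intro n
  induction n using Nat.strong_induction_on with
  | _ n ih =>
    intro l hl
    match l with
    | [] => simp [pvSelSort]
    | h :: t =>
      simp only [pvSelSort]
      have hlen : ((pvBub (h, []) t).2).length = t.length := by simp [pvBub_len]
      have hn : t.length + 1 = n := by simpa using hl
      refine List.pairwise_cons.mpr ⟨?_, ih ((pvBub (h, []) t).2).length (by omega) _ rfl⟩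
      intro b hb
      have hmem : b ∈ (pvBub (h, []) t).2 :=
        ((pvSelSort_perm _ _ rfl).mem_iff).mp hb
      exact (pvBub_min t h [] (by simp)).2 b hmem

-- the whole nested loop of A computes pvSelSort, via an explicit sorted-prefix decomposition
theorem pvInner_decomp : ∀ (todo pre done : List Char) (h : Char),
    (List.range' (pre.length + 1 + done.length) todo.length).foldl
      (fun acc z => pvInnerStep acc pre.length z) (pre ++ h :: (done ++ todo))
    = pre ++ (pvBub (h, done) todo).1 :: (pvBub (h, done) todo).2 := by
  intro todo
  induction todo with
  | nil => intro pre done h; simp [pvBub]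
  | cons x t ih =>
    intro pre done h
    simp only [List.length_cons]
    rw [List.range'_succ, List.foldl_cons]
    have hstep : pvInnerStep (pre ++ h :: (done ++ x :: t)) pre.length (pre.length + 1 + done.length)
        = if x < h then pre ++ x :: ((done ++ [h]) ++ t) else pre ++ h :: ((done ++ [x]) ++ t) := by
      have g1 : (pre ++ h :: (done ++ x :: t)).getD pre.length ' ' = h := by
        rw [List.getD_append_right _ _ _ _ (le_refl _)]
        simp
      have g2 : (pre ++ h :: (done ++ x :: t)).getD (pre.length + 1 + done.length) ' ' = x := by
        rw [List.getD_append_right _ _ _ _ (by omega)]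
        have he : pre.length + 1 + done.length - pre.length = done.length + 1 := by omega
        rw [he, List.getD_cons_succ, List.getD_append_right _ _ _ _ (le_refl _)]
        simp
      unfold pvInnerStep
      rw [g1, g2]
      split
      · have s1 : (pre ++ h :: (done ++ x :: t)).set pre.length x
            = pre ++ x :: (done ++ x :: t) := by
          rw [List.set_append, if_neg (lt_irrefl _)]
          simp
        have s2 : (pre ++ x :: (done ++ x :: t)).set (pre.length + 1 + done.length) h
            = pre ++ x :: (done ++ h :: t) := by
          rw [List.set_append, if_neg (by omega)]
          have he : pre.length + 1 + done.length - pre.length = done.length + 1 := by omega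
          rw [he, List.set_cons_succ, List.set_append, if_neg (lt_irrefl _)]
          simp
        rw [s1, s2]
        simp
      · simp
    rw [hstep]
    by_cases hc : x < h
    · rw [if_pos hc]
      have harr : pre.length + 1 + done.length + 1 = pre.length + 1 + (done ++ [h]).length := by
        simp
        omega
      rw [harr, ih pre (done ++ [h]) x]
      simp only [pvBub]
      rw [if_pos hc]
    · rw [if_neg hc]
      have harr : pre.length + 1 + done.length + 1 = pre.length + 1 + (done ++ [x]).length := by
        simp
        omega
      rw [harr, ih pre (done ++ [x]) h]
      simp only [pvBub]
      rw [if_neg hc]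

theorem pvOuter : ∀ (n : Nat) (rest : List Char), rest.length = n → ∀ (pre : List Char),
    (List.range' pre.length (rest.length - 1)).foldl pvInner (pre ++ rest)
    = pre ++ pvSelSort rest := by
  intro n
  induction n using Nat.strong_induction_on with
  | _ n ih =>
    intro rest hl pre
    match rest with
    | [] => simp [pvSelSort]
    | [x] => simp [pvSelSort, pvBub]
    | h :: x :: t =>
      have hin : pvInner (pre ++ h :: x :: t) pre.length
          = pre ++ (pvBub (h, []) (x :: t)).1 :: (pvBub (h, []) (x :: t)).2 := by
        unfold pvInner
        have hlen : (pre ++ h :: x :: t).length - (pre.length + 1) = (x :: t).length := by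
          simp
          omega
        rw [hlen]
        simpa using pvInner_decomp (x :: t) pre [] h
      have hrl : ((pvBub (h, []) (x :: t)).2).length = t.length + 1 := by
        simpa using pvBub_len (x :: t) h []
      have hrec := ih ((pvBub (h, []) (x :: t)).2).length
        (by simp at hl; omega) (pvBub (h, []) (x :: t)).2 rfl (pre ++ [(pvBub (h, []) (x :: t)).1])
      have hl1 : (h :: x :: t).length - 1 = t.length + 1 := by simp
      rw [hl1, List.range'_succ, List.foldl_cons, hin]
      have hsplit : pre ++ (pvBub (h, []) (x :: t)).1 :: (pvBub (h, []) (x :: t)).2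
          = (pre ++ [(pvBub (h, []) (x :: t)).1]) ++ (pvBub (h, []) (x :: t)).2 := by
        simp
      rw [hsplit]
      have hpl : pre.length + 1 = (pre ++ [(pvBub (h, []) (x :: t)).1]).length := by simp
      have hcl : t.length = ((pvBub (h, []) (x :: t)).2).length - 1 := by omega
      rw [hpl, hcl, hrec]
      simp only [pvSelSort]
      simp

theorem pvA_chars (l : List Char) :
    (List.range ((l.filter (fun i => i ∈ pvS)).length - 1)).foldl pvInner
      (l.filter (fun i => i ∈ pvS))
    = pvSelSort (l.filter (fun i => i ∈ pvS)) := by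
  rw [List.range_eq_range']
  have := pvOuter (l.filter (fun i => i ∈ pvS)).length (l.filter (fun i => i ∈ pvS)) rfl []
  simpa using this

-- B side
theorem pvCount_go (c : Char) : ∀ (l : List Char) (n : Nat),
    l.foldl (fun n ch => if ch = c then n + 1 else n) n = n + l.count c := by
  intro l
  induction l with
  | nil => simp
  | cons x t ih =>
    intro n
    by_cases hx : x = c <;> simp [List.foldl_cons, hx, ih] <;> omega

theorem pvCount_eq (a : List Char) (c : Char) : pvCount a c = a.count c := by
  simp [pvCount, pvCount_go]

theorem pvB_chars (a : List Char) :
    pvOrder.foldl (fun out c => out ++ List.replicate (pvCount a c) c) []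
    = pvOrder.flatMap (fun c => List.replicate (a.count c) c) := by
  rw [PySem.List.foldl_append_eq_flatMap]
  simp [pvCount_eq]

theorem pvMemIff (c : Char) : c ∈ pvS ↔ c ∈ pvOrder := by
  simp only [pvS, pvOrder, List.mem_cons, List.not_mem_nil, or_false]
  tauto

theorem pvFlat_count : ∀ (os : List Char), os.Nodup → ∀ (l : List Char) (x : Char),
    (os.flatMap fun c => List.replicate (l.count c) c).count x
      = if x ∈ os then l.count x else 0 := by
  intro os
  induction os with
  | nil => simp
  | cons c os ih =>
    intro hn l x
    obtain ⟨hc, hn'⟩ := List.nodup_cons.mp hn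
    simp only [List.flatMap_cons, List.count_append, List.count_replicate, ih hn' l x,
      List.mem_cons]
    by_cases hx : x = c
    · subst hx
      simp [hc]
    · simp [hx, Ne.symm hx]

theorem pvFlat_perm (l : List Char) :
    List.Perm (pvOrder.flatMap (fun c => List.replicate (l.count c) c)) (l.filter (fun i => i ∈ pvS)) := by
  refine List.perm_iff_count.mpr ?_
  intro x
  rw [pvFlat_count pvOrder (by decide) l x]
  by_cases hx : x ∈ pvOrder
  · rw [if_pos hx, List.count_filter]
    simp [pvMemIff, hx]
  · rw [if_neg hx]
    symm
    rw [List.count_eq_zero]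
    intro hmem
    exact hx (pvMemIff x |>.mp (by simpa using (List.mem_filter.mp hmem).2))

theorem pvFlat_sorted (l : List Char) :
    (pvOrder.flatMap (fun c => List.replicate (l.count c) c)).Pairwise (· ≤ ·) := by
  have key : ∀ (os : List Char), os.Pairwise (· < ·) →
      (os.flatMap fun c => List.replicate (l.count c) c).Pairwise (· ≤ ·) := by
    intro os
    induction os with
    | nil => simp
    | cons c os ih =>
      intro hp
      obtain ⟨hlt, hp'⟩ := List.pairwise_cons.mp hp
      simp only [List.flatMap_cons]
      refine List.pairwise_append.mpr ⟨List.pairwise_replicate.mpr (Or.inr le_rfl), ih hp', ?_⟩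
      intro a ha b hb
      obtain ⟨c', hc', hb'⟩ := List.mem_flatMap.mp hb
      rw [List.eq_of_mem_replicate ha, List.eq_of_mem_replicate hb']
      exact le_of_lt (hlt c' hc')
  exact key pvOrder (by decide)

-- ===== VERDICT (by name: the statement is the Claim_ definition above) =====
theorem Speciali_spec : Claim_equal_Speciali := by
  intro a _
  unfold Spec_Speciali Speciali Speciali_alt
  simp only [pvA_chars, pvB_chars]
  congr 1
  exact (List.Perm.eq_of_pairwise'
    (pvSelSort_sorted _ _ rfl)
    (pvFlat_sorted a.toList)
    ((pvSelSort_perm _ _ rfl).trans (pvFlat_perm a.toList).symm)).symm ▸ rfl
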